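-- pv_equiv track=rewrite | github.com/mvorlander/botlz-2_screen | boltz-2_wrapper.py | array_constraint
-- ===== SOURCE A (Python) =====
-- def array_constraint(job_constraints: list[str]) -> str:
--     """
--     Pick one Slurm constraint that is valid for every job in an array.
--
--     The per-job heuristic emits a pipe-delimited list of acceptable GPU classes.
--     For arrays we must intersect those sets; otherwise a later job can land on a
--     node class that was only valid for the first entry.
--     """
--     if not job_constraints:
--         return "g4|g3|g2|g1"
--
--     ordered = ["g4", "g2", "g3", "g1"]
--     allowed = set(ordered)
--     for constraint in job_constraints:
--         allowed &= {part.strip() for part in constraint.split("|") if part.strip()}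
--
--     if not allowed:
--         return "g4"
--
--     return "|".join(gpu for gpu in ordered if gpu in allowed)
-- ===== SOURCE B (Python) =====
-- def array_constraint(job_constraints: list[str]) -> str:
--     if not job_constraints:
--         return "g4|g3|g2|g1"
--
--     tally: dict[str, int] = {}
--     for job in job_constraints:
--         for part in {p.strip() for p in job.split("|")}:
--             if part:
--                 tally[part] = tally.get(part, 0) + 1
--
--     n = len(job_constraints)
--     kept = [g for g in ("g4", "g2", "g3", "g1") if tally.get(g, 0) == n]
--     return "|".join(kept) if kept else "g4"
-- ===== Notes on version B (the rewrite author's own statement) =====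
-- stated objective: alternative
-- what changed: Replaces the progressive set-intersection accumulator with a single tally pass: a dict counts, across all jobs, how many jobs contain each stripped non-empty part, and a class survives iff its count equals the number of jobs.
import Mathlib
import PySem

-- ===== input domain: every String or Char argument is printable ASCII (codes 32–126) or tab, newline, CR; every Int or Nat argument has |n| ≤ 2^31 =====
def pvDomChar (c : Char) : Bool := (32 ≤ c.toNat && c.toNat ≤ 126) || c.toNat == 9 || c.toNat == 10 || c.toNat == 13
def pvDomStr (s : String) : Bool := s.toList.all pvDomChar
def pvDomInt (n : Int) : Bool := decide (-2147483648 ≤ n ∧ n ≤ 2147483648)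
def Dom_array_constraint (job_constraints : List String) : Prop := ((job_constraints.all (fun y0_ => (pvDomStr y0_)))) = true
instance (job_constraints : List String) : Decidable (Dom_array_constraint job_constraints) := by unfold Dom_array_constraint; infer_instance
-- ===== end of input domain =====

-- B replaces A's progressive set-intersection with a single tally pass (count per class, then
-- threshold against the number of jobs); an alternative of the same cost, not claimed faster.

-- s.split("|"): separator is non-empty, so PySem.Str.split? is always `some`; exact
def pvSplitPipe (s : String) : List String := (PySem.Str.split? s "|").getD []

-- ===== PORT A =====
def array_constraint (job_constraints : List String) : String :=
  if job_constraints = [] then "g4|g3|g2|g1"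
  else
    let ordered : List String := ["g4", "g2", "g3", "g1"]
    let allowed := job_constraints.foldl
      (fun allowed constraint =>
        PySem.Set.inter allowed
          (PySem.Set.ofList
            (((pvSplitPipe constraint).map PySem.Str.strip).filter (fun p => p ≠ ""))))
      (PySem.Set.ofList ordered)
    if allowed = ([] : PySem.Set String) then "g4"
    else PySem.Str.join "|" (ordered.filter (fun gpu => allowed.contains gpu))

-- ===== PORT B =====
-- B's inner loop iterates a Python set; the resulting dict is only looked up afterwards,
-- so the result does not depend on that iteration order
def array_constraint_alt (job_constraints : List String) : String :=
  if job_constraints = [] then "g4|g3|g2|g1"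
  else
    let tally : PySem.Dict String Int := job_constraints.foldl
      (fun tally job =>
        (PySem.Set.ofList ((pvSplitPipe job).map PySem.Str.strip)).foldl
          (fun tally part =>
            if part ≠ "" then tally.insert part (tally.getD part 0 + 1) else tally)
          tally)
      PySem.Dict.empty
    let n : Int := job_constraints.length
    let kept := (["g4", "g2", "g3", "g1"] : List String).filter (fun g => tally.getD g 0 == n)
    if kept ≠ [] then PySem.Str.join "|" kept else "g4"

-- ===== PRECONDITION & SPEC =====
def Spec_array_constraint (job_constraints : List String) (out : String) : Prop := out = array_constraint_alt job_constraints
instance (job_constraints : List String) (out : String) : Decidable (Spec_array_constraint job_constraints out) := by unfold Spec_array_constraint; infer_instance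

-- ===== CLAIM (what is proved, stated in full; the proofs are below) =====
def Claim_equal_array_constraint : Prop := ∀ (job_constraints : List String), Dom_array_constraint job_constraints → Spec_array_constraint job_constraints (array_constraint job_constraints)

-- ===== LEMMAS AND PROOFS =====

-- stripped parts of one job string
def pvParts (job : String) : List String :=
  (pvSplitPipe job).map PySem.Str.strip

-- B's inner loop over a nodup list bumps g's tally exactly once iff g is a nonempty member
theorem pv_inner_getD (l : List String) (hl : l.Nodup) (d : PySem.Dict String Int)
    (g : String) (hg : g ≠ "") :
    (l.foldl (fun tally part =>
        if part ≠ "" then tally.insert part (tally.getD part 0 + 1) else tally) d).getD g 0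
      = d.getD g 0 + (if g ∈ l then 1 else 0) := by
  induction l generalizing d with
  | nil => simp
  | cons p l ih =>
    rcases List.nodup_cons.mp hl with ⟨hp, hl'⟩
    simp only [List.foldl_cons]
    rw [ih hl']
    by_cases hpe : p = ""
    · subst hpe
      simp only [ne_eq, not_true_eq_false, if_false, List.mem_cons]
      have hge : ¬ g = "" := hg
      simp [hge]
    · simp only [ne_eq, hpe, not_false_eq_true, if_true]
      rw [PySem.Dict.getD_insert]
      by_cases hgp : g = p
      · subst hgp
        simp [hp]
      · simp [hgp, List.mem_cons]

-- B's tally counts, for each class, the jobs whose stripped parts contain it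
theorem pv_tally_getD (jobs : List String) (d : PySem.Dict String Int)
    (g : String) (hg : g ≠ "") :
    (jobs.foldl
        (fun tally job =>
          (PySem.Set.ofList (pvParts job)).foldl
            (fun tally part =>
              if part ≠ "" then tally.insert part (tally.getD part 0 + 1) else tally)
            tally)
        d).getD g 0
      = d.getD g 0 + (jobs.countP (fun job => decide (g ∈ pvParts job)) : Int) := by
  induction jobs generalizing d with
  | nil => simp
  | cons j jobs ih =>
    simp only [List.foldl_cons]
    rw [ih, pv_inner_getD _ (PySem.Set.nodup_ofList _) _ _ hg, List.countP_cons]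
    have hmem : (g ∈ PySem.Set.ofList (pvParts j)) ↔ g ∈ pvParts j :=
      PySem.Set.mem_ofList _ _
    by_cases h : g ∈ pvParts j
    · simp only [hmem, h, if_true, decide_true]
      push_cast; ring
    · simp [hmem, h]

-- membership in A's iterated intersection
theorem pv_inter_mem (jobs : List String) (s : PySem.Set String) (g : String) :
    g ∈ jobs.foldl
        (fun allowed constraint =>
          PySem.Set.inter allowed
            (PySem.Set.ofList ((pvParts constraint).filter (fun p => p ≠ "")))) s
      ↔ g ∈ s ∧ ∀ job ∈ jobs, g ∈ (pvParts job).filter (fun p => p ≠ "") := by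
  induction jobs generalizing s with
  | nil => simp
  | cons j jobs ih =>
    simp only [List.foldl_cons]
    rw [ih]
    constructor
    · rintro ⟨hs, hall⟩
      rcases (PySem.Set.mem_inter _ _ _).mp hs with ⟨h1, h2⟩
      refine ⟨h1, ?_⟩
      intro job hjob
      rcases List.mem_cons.mp hjob with h | h
      · subst h; exact (PySem.Set.mem_ofList _ _).mp h2
      · exact hall job h
    · rintro ⟨hs, hall⟩
      refine ⟨(PySem.Set.mem_inter _ _ _).mpr
        ⟨hs, (PySem.Set.mem_ofList _ _).mpr (hall j (by simp))⟩, ?_⟩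
      intro job hjob; exact hall job (List.mem_cons_of_mem _ hjob)

theorem array_constraint_spec_aux (job_constraints : List String) :
    array_constraint job_constraints = array_constraint_alt job_constraints := by
  by_cases hnil : job_constraints = []
  · simp [array_constraint, array_constraint_alt, hnil]
  · simp only [array_constraint, array_constraint_alt, hnil, if_false]
    set ordered : List String := ["g4", "g2", "g3", "g1"] with hord
    set allowed := job_constraints.foldl
      (fun allowed constraint =>
        PySem.Set.inter allowed
          (PySem.Set.ofList
            (((pvSplitPipe constraint).map PySem.Str.strip).filter (fun p => p ≠ ""))))
      (PySem.Set.ofList ordered) with hallowed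
    set tally : PySem.Dict String Int := job_constraints.foldl
      (fun tally job =>
        (PySem.Set.ofList ((pvSplitPipe job).map PySem.Str.strip)).foldl
          (fun tally part =>
            if part ≠ "" then tally.insert part (tally.getD part 0 + 1) else tally)
          tally)
      PySem.Dict.empty with htally
    have hmemA : ∀ g, g ∈ allowed ↔
        g ∈ PySem.Set.ofList ordered ∧
          ∀ job ∈ job_constraints, g ∈ (pvParts job).filter (fun p => p ≠ "") := by
      intro g
      rw [hallowed]
      exact pv_inter_mem job_constraints (PySem.Set.ofList ordered) g
    have hfilters : ordered.filter (fun gpu => allowed.contains gpu)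
        = ordered.filter (fun g => tally.getD g 0 == (job_constraints.length : Int)) := by
      apply List.filter_congr
      intro g hgord
      have hg : g ≠ "" := by
        rw [hord] at hgord
        rintro rfl
        exact absurd hgord (by decide)
      have hcount : tally.getD g 0
          = (job_constraints.countP (fun job => decide (g ∈ pvParts job)) : Int) := by
        rw [htally]
        have h := pv_tally_getD job_constraints PySem.Dict.empty g hg
        simpa [pvParts] using h
      have hiff : allowed.contains g = true ↔
          ∀ job ∈ job_constraints, g ∈ pvParts job := by
        rw [PySem.Set.contains_iff, hmemA]
        constructor
        · rintro ⟨_, hall⟩ job hjob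
          exact (List.mem_filter.mp (hall job hjob)).1
        · intro hall
          refine ⟨(PySem.Set.mem_ofList _ _).mpr hgord, ?_⟩
          intro job hjob
          exact List.mem_filter.mpr ⟨hall job hjob, by simpa using hg⟩
      have hco : (tally.getD g 0 == (job_constraints.length : Int)) = true ↔
          ∀ job ∈ job_constraints, g ∈ pvParts job := by
        rw [hcount, beq_iff_eq, Int.natCast_inj, List.countP_eq_length]
        simp
      by_cases hall : ∀ job ∈ job_constraints, g ∈ pvParts job
      · rw [hiff.mpr hall, hco.mpr hall]
      · have h1 : allowed.contains g = false :=
          Bool.eq_false_iff.mpr (fun hc => hall (hiff.mp hc))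
        have h2 : (tally.getD g 0 == (job_constraints.length : Int)) = false :=
          Bool.eq_false_iff.mpr (fun hc => hall (hco.mp hc))
        rw [h1, h2]
    have hsub : ∀ x ∈ allowed, x ∈ ordered := by
      intro x hx
      exact (PySem.Set.mem_ofList _ _).mp ((hmemA x).mp hx).1
    rw [← hfilters]
    by_cases hA : allowed = ([] : PySem.Set String)
    · rw [if_pos hA]
      have hf : ordered.filter (fun gpu => allowed.contains gpu) = [] := by
        rw [hA]; rfl
      rw [hf]
      simp
    · rw [if_neg hA]
      have hne : ordered.filter (fun gpu => allowed.contains gpu) ≠ [] := by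
        intro hf
        apply hA
        rw [List.eq_nil_iff_forall_not_mem]
        intro x hx
        have hnm := List.filter_eq_nil_iff.mp hf x (hsub x hx)
        simp at hnm
        exact absurd hx hnm
      rw [if_pos hne]

-- ===== VERDICT (by name: the statement is the Claim_ definition above) =====
theorem array_constraint_spec : Claim_equal_array_constraint := by
  intro jc _
  exact array_constraint_spec_aux jc
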